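-- pv_equiv track=rewrite | github.com/Zephyr618/nika | scripts/viz_agent_log.py | extract_first_content
-- ===== SOURCE A (Python) =====
-- def extract_first_content(messages_str: str) -> str:
--     """Pull the first content="..." out of a langchain message repr.
--
--     langchain serializes messages as e.g. content="..." additional_kwargs={} ...
--     The content can contain newlines and escaped quotes. We grab from the first
--     content=" up to the matching unescaped " by walking the string.
--     """
--     idx = messages_str.find('content="')
--     if idx < 0:
--         return messages_str
--     i = idx + len('content="')
--     out = []
--     while i < len(messages_str):
--         c = messages_str[i]
--         if c == "\\" and i + 1 < len(messages_str):
--             nxt = messages_str[i + 1]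
--             if nxt == "n":
--                 out.append("\n")
--             elif nxt == "t":
--                 out.append("\t")
--             elif nxt == '"':
--                 out.append('"')
--             elif nxt == "\\":
--                 out.append("\\")
--             else:
--                 out.append(nxt)
--             i += 2
--             continue
--         if c == '"':
--             break
--         out.append(c)
--         i += 1
--     return "".join(out)
-- ===== SOURCE B (Python) =====
-- def extract_first_content(messages_str: str) -> str:
--     """Two-pass version: locate the span of the first content="...", then decode it."""
--     idx = messages_str.find('content="')
--     if idx < 0:
--         return messages_str
--     i = idx + len('content="')
--     n = len(messages_str)
--     # pass 1: find the end of the span (unescaped closing quote or end of string)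
--     j = i
--     while j < n:
--         c = messages_str[j]
--         if c == "\\" and j + 1 < n:
--             j += 2
--         elif c == '"':
--             break
--         else:
--             j += 1
--     raw = messages_str[i:j]
--     # pass 2: decode escapes in the span
--     table = {"n": "\n", "t": "\t"}
--     out = []
--     k = 0
--     m = len(raw)
--     while k < m:
--         c = raw[k]
--         if c == "\\" and k + 1 < m:
--             nxt = raw[k + 1]
--             out.append(table.get(nxt, nxt))
--             k += 2
--         else:
--             out.append(c)
--             k += 1
--     return "".join(out)
-- ===== Notes on version B (the rewrite author's own statement) =====
-- stated objective: alternative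
-- what changed: Replaces A's fused scan-and-decode loop (one walk that classifies each escape and appends decoded characters) by two separate passes: first locate the end of the content span by pure index arithmetic, slice the raw span out, then decode its escapes with a small lookup table.
import Mathlib
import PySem

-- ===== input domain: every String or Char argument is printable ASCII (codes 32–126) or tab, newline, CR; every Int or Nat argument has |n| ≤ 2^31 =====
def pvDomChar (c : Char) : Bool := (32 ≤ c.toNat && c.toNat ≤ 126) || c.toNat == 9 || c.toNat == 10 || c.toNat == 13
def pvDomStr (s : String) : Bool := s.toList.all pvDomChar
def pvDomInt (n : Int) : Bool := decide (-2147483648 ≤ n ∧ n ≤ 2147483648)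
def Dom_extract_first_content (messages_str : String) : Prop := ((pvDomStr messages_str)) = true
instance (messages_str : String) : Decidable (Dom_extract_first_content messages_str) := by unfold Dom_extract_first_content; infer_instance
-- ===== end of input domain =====

-- B splits A's fused scan-and-decode loop into two passes (locate the span, then decode it via a lookup table); same cost, different decomposition; return value only.


-- ===== PORT A =====
-- A's while loop, as structural recursion on the suffix starting at index i
-- (messages_str[i] is the head; "i + 1 < len" is "the suffix has a second element").
def pvAloop : List Char → List Char
  | [] => []
  | [c] => if c = '"' then [] else [c]
  | c :: nxt :: rest =>
    if c = '\\' then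
      (if nxt = 'n' then '\n'
       else if nxt = 't' then '\t'
       else if nxt = '"' then '"'
       else if nxt = '\\' then '\\'
       else nxt) :: pvAloop rest
    else if c = '"' then []
    else c :: pvAloop (nxt :: rest)

def extract_first_content (messages_str : String) : String :=
  let idx := PySem.Str.find messages_str "content=\""
  if idx < 0 then messages_str
  else String.ofList (pvAloop (messages_str.toList.drop (idx.toNat + 9)))

-- ===== PORT B =====
-- Source B's first pass: length j - i of the raw span, recursing on the suffix at j.
def pvBspan : List Char → Nat
  | [] => 0
  | [c] => if c = '"' then 0 else 1
  | c :: nxt :: rest =>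
    if c = '\\' then 2 + pvBspan rest
    else if c = '"' then 0
    else 1 + pvBspan (nxt :: rest)

-- Source B's escape table {"n": "\n", "t": "\t"}
def pvBtable : PySem.Dict Char Char := PySem.Dict.ofList [('n', '\n'), ('t', '\t')]

-- Source B's second pass: decode escapes inside the raw span.
def pvBdecode : List Char → List Char
  | [] => []
  | [c] => [c]
  | c :: nxt :: rest =>
    if c = '\\' then pvBtable.getD nxt nxt :: pvBdecode rest
    else c :: pvBdecode (nxt :: rest)

def extract_first_content_alt (messages_str : String) : String :=
  let idx := PySem.Str.find messages_str "content=\""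
  if idx < 0 then messages_str
  else
    let rest := messages_str.toList.drop (idx.toNat + 9)
    String.ofList (pvBdecode (rest.take (pvBspan rest)))

-- ===== PRECONDITION & SPEC =====
def Spec_extract_first_content (messages_str : String) (out : String) : Prop := out = extract_first_content_alt messages_str
instance (messages_str : String) (out : String) : Decidable (Spec_extract_first_content messages_str out) := by unfold Spec_extract_first_content; infer_instance

-- ===== CLAIM (what is proved, stated in full; the proofs are below) =====
def Claim_equal_extract_first_content : Prop := ∀ (messages_str : String), Dom_extract_first_content messages_str → Spec_extract_first_content messages_str (extract_first_content messages_str)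

-- ===== LEMMAS AND PROOFS =====
theorem pvBtable_getD (c : Char) :
    pvBtable.getD c c = if c = 'n' then '\n' else if c = 't' then '\t' else c := by
  simp [pvBtable, PySem.Dict.ofList, PySem.Dict.update, PySem.Dict.getD_eq_get?_getD,
    PySem.Dict.get?_insert]
  split_ifs <;> simp_all

theorem pvBdecode_cons_ne (c : Char) (l : List Char) (h : c ≠ '\\') :
    pvBdecode (c :: l) = c :: pvBdecode l := by
  cases l <;> simp [pvBdecode, h]

theorem pvKey (l : List Char) : pvBdecode (l.take (pvBspan l)) = pvAloop l := by
  induction l using pvAloop.induct with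
  | case1 => rfl
  | case2 => simp [pvAloop, pvBspan, pvBdecode]
  | case3 c h => simp [pvAloop, pvBspan, pvBdecode, h]
  | case4 nxt rest ih =>
    rw [show pvBspan ('\\' :: nxt :: rest) = pvBspan rest + 1 + 1 by simp [pvBspan]; omega]
    rw [List.take_succ_cons, List.take_succ_cons]
    simp only [pvBdecode, pvAloop]
    simp only [if_true]
    rw [ih, pvBtable_getD]
    split_ifs <;> simp_all
  | case5 nxt rest h =>
    simp [pvAloop, pvBspan, pvBdecode]
  | case6 c nxt rest h1 h2 ih =>
    rw [show pvBspan (c :: nxt :: rest) = pvBspan (nxt :: rest) + 1 by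
      simp [pvBspan, h1, h2]; omega]
    rw [List.take_succ_cons, pvBdecode_cons_ne c _ h1, ih]
    simp [pvAloop, h1, h2]

-- ===== VERDICT (by name: the statement is the Claim_ definition above) =====
theorem extract_first_content_spec : Claim_equal_extract_first_content := by
  intro s _
  unfold Spec_extract_first_content extract_first_content extract_first_content_alt
  dsimp only
  split
  · rfl
  · rw [pvKey]
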